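-- pv_equiv track=rewrite | github.com/enzneer/PyProjects | currutils.py | genComma
-- ===== SOURCE A (Python) =====
-- def genComma(valTxt):
--     l = len(valTxt)
--     if l < 4:
--         return valTxt
--     myList = []
--     restTh = (l-3)
--     if restTh%2:
--         myList.append(valTxt[0])
--     for i in range(restTh%2, restTh, 2):
--         myList.append('%s%s'%(valTxt[i], valTxt[i+1]))
--     myList.append('%s%s%s'%(valTxt[restTh], valTxt[restTh+1],  valTxt[restTh+2]))
--     return ','.join(myList)
-- ===== SOURCE B (Python) =====
-- def genComma(valTxt):
--     if len(valTxt) < 4: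
--         return valTxt
--     prefix, last = valTxt[:-3], valTxt[-3:]
--     groups = []
--     i = len(prefix)
--     while i > 0:
--         groups.append(prefix[max(0, i - 2):i])
--         i -= 2
--     groups.reverse()
--     groups.append(last)
--     return ','.join(groups)
-- ===== Notes on version B (the rewrite author's own statement) =====
-- stated objective: simpler
-- what changed: B splits off the last-3 group and chunks the remaining prefix into 2-char groups right-to-left (collect, reverse, join), replacing A's forward parity-offset index loop with per-character indexing and %-formatting.
import Mathlib
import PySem

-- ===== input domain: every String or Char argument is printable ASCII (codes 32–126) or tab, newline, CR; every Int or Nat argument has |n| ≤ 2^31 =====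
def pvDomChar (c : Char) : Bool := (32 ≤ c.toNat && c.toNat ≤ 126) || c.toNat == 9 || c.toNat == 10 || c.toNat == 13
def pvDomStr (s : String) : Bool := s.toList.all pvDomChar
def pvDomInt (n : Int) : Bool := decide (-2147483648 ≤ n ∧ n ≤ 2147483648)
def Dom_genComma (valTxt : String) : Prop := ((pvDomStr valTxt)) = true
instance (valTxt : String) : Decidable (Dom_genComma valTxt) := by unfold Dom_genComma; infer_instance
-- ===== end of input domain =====

-- B (simpler decomposition): split off the last 3 chars and chunk the remaining prefix into
-- 2-char slices from the right, instead of A's forward parity-offset index loop; same value everywhere.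

-- ===== PORT A =====
-- valTxt[i] as a 1-char piece; every use below is in range, so `.elim []` is exact
def pvGet1 (s : List Char) (i : Int) : List Char :=
  (PySem.List.pyGet? s i).elim [] (fun c => [c])

def genComma (valTxt : String) : String :=
  let s := valTxt.toList
  let l : Int := (s.length : Int)
  if l < 4 then valTxt
  else
    let restTh : Int := l - 3
    let myList : List (List Char) :=
      if PySem.Int.mod restTh 2 ≠ 0 then [pvGet1 s 0] else []
    let myList :=
      (PySem.List.pyRange (PySem.Int.mod restTh 2) restTh 2).foldl
        (fun acc i => acc ++ [pvGet1 s i ++ pvGet1 s (i + 1)]) myList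
    let myList := myList ++ [pvGet1 s restTh ++ pvGet1 s (restTh + 1) ++ pvGet1 s (restTh + 2)]
    String.ofList (PySem.Chars.join [','] myList)

-- ===== PORT B =====
-- the `while i > 0: groups.append(prefix[max(0, i-2):i]); i -= 2` loop of Source B
def pvBLoop (p : List Char) (acc : List (List Char)) (i : Nat) : List (List Char) :=
  if i = 0 then acc
  else pvBLoop p (acc ++ [PySem.List.slice p (some (max 0 ((i : Int) - 2))) (some (i : Int))]) (i - 2)
termination_by i
decreasing_by omega

def genComma_alt (valTxt : String) : String :=
  let s := valTxt.toList
  if (s.length : Int) < 4 then valTxt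
  else
    let pre := PySem.List.slice s none (some (-3))
    let last := PySem.List.slice s (some (-3)) none
    let groups := pvBLoop pre [] pre.length
    String.ofList (PySem.Chars.join [','] (groups.reverse ++ [last]))

-- ===== PRECONDITION & SPEC =====
def Spec_genComma (valTxt : String) (out : String) : Prop := out = genComma_alt valTxt
instance (valTxt : String) (out : String) : Decidable (Spec_genComma valTxt out) := by unfold Spec_genComma; infer_instance

-- ===== CLAIM (what is proved, stated in full; the proofs are below) =====
def Claim_equal_genComma : Prop := ∀ (valTxt : String), Dom_genComma valTxt → Spec_genComma valTxt (genComma valTxt)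

-- ===== LEMMAS AND PROOFS =====

-- the common group list: optional leading 1-char group, then pairs at i%2, i%2+2, …
def pvAG (p : List Char) (i : Nat) : List (List Char) :=
  (if i % 2 = 1 then [pvGet1 p 0] else []) ++
  (List.range (i / 2)).map (fun k =>
    pvGet1 p ((i % 2 + 2 * k : Nat) : Int) ++ pvGet1 p (((i % 2 + 2 * k : Nat) : Int) + 1))

theorem pvGet1_elem (p : List Char) (m : Nat) (h : m < p.length) :
    pvGet1 p ((m : Nat) : Int) = [p[m]] := by
  have h1 : ((m : Nat) : Int) < (p.length : Int) := by omega
  simp [pvGet1, PySem.List.pyGet?, PySem.List.pyIdx?, h1, List.getElem?_eq_getElem h]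

theorem pvGet1_zero (a : Char) (t : List Char) : pvGet1 (a :: t) 0 = [a] := by
  simpa using pvGet1_elem (a :: t) 0 (by simp)

theorem pvTake2Drop (p : List Char) (m : Nat) (h : m + 2 ≤ p.length) :
    (p.drop m).take 2 = pvGet1 p m ++ pvGet1 p ((m : Int) + 1) := by
  rw [List.drop_eq_getElem_cons (show m < p.length by omega),
      List.drop_eq_getElem_cons (show m + 1 < p.length by omega)]
  have e : ((m : Int) + 1) = ((m + 1 : Nat) : Int) := by push_cast; ring
  rw [e, pvGet1_elem p m (by omega), pvGet1_elem p (m + 1) (by omega)]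
  rfl

theorem pvDrop3 (s : List Char) (r : Nat) (h : s.length = r + 3) :
    s.drop r = pvGet1 s r ++ pvGet1 s ((r : Int) + 1) ++ pvGet1 s ((r : Int) + 2) := by
  rw [List.drop_eq_getElem_cons (show r < s.length by omega),
      List.drop_eq_getElem_cons (show r + 1 < s.length by omega),
      List.drop_eq_getElem_cons (show r + 2 < s.length by omega)]
  have hend : s.drop (r + 2 + 1) = [] := by
    apply List.drop_eq_nil_of_le; omega
  have e1 : ((r : Int) + 1) = ((r + 1 : Nat) : Int) := by push_cast; ring
  have e2 : ((r : Int) + 2) = ((r + 2 : Nat) : Int) := by push_cast; ring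
  rw [hend, e1, e2, pvGet1_elem s r (by omega), pvGet1_elem s (r + 1) (by omega),
      pvGet1_elem s (r + 2) (by omega)]
  rfl

theorem pvBLoop_zero (p : List Char) (acc : List (List Char)) : pvBLoop p acc 0 = acc := by
  rw [pvBLoop]; simp

theorem pvBLoop_acc (p : List Char) (i : Nat) :
    ∀ acc, pvBLoop p acc i = acc ++ pvBLoop p [] i := by
  induction i using Nat.strong_induction_on with
  | _ i ih =>
    intro acc
    by_cases h : i = 0
    · subst h; simp [pvBLoop_zero]
    · conv_lhs => rw [pvBLoop]
      conv_rhs => rw [pvBLoop]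
      rw [if_neg h, if_neg h,
          ih (i - 2) (by omega) (acc ++ [_]), ih (i - 2) (by omega) ([] ++ [_])]
      simp

theorem pvSlicePair (p : List Char) (m : Nat) (h : m + 2 ≤ p.length) :
    PySem.List.slice p (some (max 0 (((m + 2 : Nat) : Int) - 2))) (some ((m + 2 : Nat) : Int))
      = pvGet1 p m ++ pvGet1 p ((m : Int) + 1) := by
  have hmax : max 0 (((m + 2 : Nat) : Int) - 2) = ((m : Nat) : Int) := by push_cast; omega
  rw [hmax]
  have c1 : ¬(((m : Nat) : Int) < 0) := by omega
  have c2 : ¬(((m + 2 : Nat) : Int) < 0) := by omega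
  simp only [PySem.List.slice, PySem.List.clampIdx, c1, c2, if_false, Int.toNat_natCast]
  have hm1 : min m p.length = m := by omega
  have hm2 : min (m + 2) p.length = m + 2 := by omega
  rw [hm1, hm2, show m + 2 - m = 2 by omega]
  exact pvTake2Drop p m h

theorem pvSliceOne (p : List Char) (h : 1 ≤ p.length) :
    PySem.List.slice p none (some 1) = pvGet1 p 0 := by
  match p, h with
  | a :: t, _ =>
    simp [PySem.List.slice, PySem.List.clampIdx, pvGet1_zero]

theorem pvAG_step (p : List Char) (m : Nat) :
    pvAG p (m + 2) = pvAG p m ++ [pvGet1 p m ++ pvGet1 p ((m : Int) + 1)] := by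
  have h2 : (m + 2) % 2 = m % 2 := by omega
  have h3 : (m + 2) / 2 = m / 2 + 1 := by omega
  have h4 : m % 2 + 2 * (m / 2) = m := by omega
  have e : ((m : Int) + 1) = ((m + 1 : Nat) : Int) := by push_cast; ring
  simp only [pvAG, h2, h3, List.range_succ, List.map_append, List.map_cons, List.map_nil, h4, e]
  simp [List.append_assoc]

theorem pvBLoop_reverse (p : List Char) :
    ∀ i : Nat, i ≤ p.length → (pvBLoop p [] i).reverse = pvAG p i := by
  intro i
  induction i using Nat.strong_induction_on with
  | _ i ih =>
    intro hi
    by_cases h0 : i = 0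
    · subst h0; simp [pvBLoop_zero, pvAG]
    · by_cases h1 : i = 1
      · subst h1
        rw [pvBLoop, if_neg (by omega), pvBLoop_acc]
        norm_num [pvBLoop_zero]
        rw [pvSliceOne p hi]
        simp [pvAG]
      · obtain ⟨m, rfl⟩ : ∃ m, i = m + 2 := ⟨i - 2, by omega⟩
        rw [pvBLoop, if_neg (by omega), pvBLoop_acc]
        simp only [Nat.add_sub_cancel, List.nil_append, List.reverse_append, List.reverse_cons,
          List.reverse_nil]
        rw [ih m (by omega) (by omega), pvSlicePair p m hi, pvAG_step]

theorem pvGet1_take (s : List Char) (r j : Nat) (hj : j < r) (hr : r ≤ s.length) :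
    pvGet1 (s.take r) ((j : Nat) : Int) = pvGet1 s ((j : Nat) : Int) := by
  rw [pvGet1_elem (s.take r) j (by simp; omega), pvGet1_elem s j (by omega)]
  simp [List.getElem_take]

theorem pvAG_take (s : List Char) (r : Nat) (hr : r ≤ s.length) :
    pvAG (s.take r) r = pvAG s r := by
  unfold pvAG
  congr 1
  · by_cases hodd : r % 2 = 1
    · have h0 : 0 < r := by omega
      simp only [hodd, if_true]
      have := pvGet1_take s r 0 h0 hr
      simpa using this
    · simp [hodd]
  · apply List.map_congr_left
    intro k hk
    have hk' : k < r / 2 := List.mem_range.mp hk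
    have e : (((r % 2 + 2 * k : Nat) : Int) + 1) = ((r % 2 + 2 * k + 1 : Nat) : Int) := by
      push_cast; ring
    rw [e, pvGet1_take s r (r % 2 + 2 * k) (by omega) hr,
        pvGet1_take s r (r % 2 + 2 * k + 1) (by omega) hr]

theorem pvModCast (r : Nat) : PySem.Int.mod ((r : Nat) : Int) 2 = ((r % 2 : Nat) : Int) := by
  rw [PySem.Int.mod_eq_emod_of_pos (by norm_num)]
  push_cast
  omega

theorem pvRangeA (r : Nat) (f : Int → List Char) :
    (PySem.List.pyRange (PySem.Int.mod ((r : Nat) : Int) 2) ((r : Nat) : Int) 2).map f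
      = (List.range (r / 2)).map (fun (k : Nat) => f ((r % 2 + 2 * k : Nat) : Int)) := by
  rw [pvModCast, PySem.List.pyRange_of_pos _ _ (by norm_num), List.map_map]
  have hcnt : (if ((r % 2 : Nat) : Int) < ((r : Nat) : Int) then
      ((((r : Nat) : Int) - ((r % 2 : Nat) : Int) + 2 - 1) / 2).toNat else 0) = r / 2 := by
    split_ifs with h <;> omega
  rw [hcnt]
  apply List.map_congr_left
  intro k _
  simp only [Function.comp]
  congr 1

theorem pvSlicePre (s : List Char) (r : Nat) (h : s.length = r + 3) :
    PySem.List.slice s none (some (-3)) = s.take r := by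
  have c1 : ((-3 : Int) < 0) := by norm_num
  have c2 : ¬((s.length : Int) + (-3) < 0) := by omega
  simp only [PySem.List.slice, PySem.List.clampIdx, c1, if_true, c2, if_false]
  rw [show ((s.length : Int) + (-3)).toNat = r by omega]
  simp

theorem pvSliceLast (s : List Char) (r : Nat) (h : s.length = r + 3) :
    PySem.List.slice s (some (-3)) none = s.drop r := by
  have c1 : ((-3 : Int) < 0) := by norm_num
  have c2 : ¬((s.length : Int) + (-3) < 0) := by omega
  simp only [PySem.List.slice, PySem.List.clampIdx, c1, if_true, c2, if_false]
  rw [show ((s.length : Int) + (-3)).toNat = r by omega]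
  apply List.take_of_length_le
  simp [h]

-- ===== VERDICT (by name: the statement is the Claim_ definition above) =====
theorem genComma_spec : Claim_equal_genComma := by
  intro valTxt _
  unfold Spec_genComma genComma genComma_alt
  by_cases h : ((valTxt.toList.length : Int) < 4)
  · simp only [h, if_true]
  · simp only [h, if_false]
    obtain ⟨r, hr⟩ : ∃ r, valTxt.toList.length = r + 3 := ⟨valTxt.toList.length - 3, by omega⟩
    have hc : ((valTxt.toList.length : Int) - 3) = ((r : Nat) : Int) := by omega
    have hrlen : r ≤ valTxt.toList.length := by omega
    rw [hc, pvSlicePre valTxt.toList r hr, pvSliceLast valTxt.toList r hr]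
    have hlen : (valTxt.toList.take r).length = r := by rw [List.length_take]; omega
    rw [hlen, pvBLoop_reverse (valTxt.toList.take r) r (by omega),
        pvAG_take valTxt.toList r hrlen,
        PySem.List.foldl_append_singleton_eq_map
          (fun i => pvGet1 valTxt.toList i ++ pvGet1 valTxt.toList (i + 1)),
        pvRangeA r (fun i => pvGet1 valTxt.toList i ++ pvGet1 valTxt.toList (i + 1)),
        pvDrop3 valTxt.toList r hr]
    have hif : (if PySem.Int.mod ((r : Nat) : Int) 2 ≠ 0 then [pvGet1 valTxt.toList 0] else [])
        = (if r % 2 = 1 then [pvGet1 valTxt.toList 0] else []) := by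
      rw [pvModCast r]
      by_cases hodd : r % 2 = 1
      · simp [hodd]
      · have h0 : r % 2 = 0 := by omega
        simp [h0]
    rw [hif]
    simp [pvAG, List.append_assoc]
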